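-- pv_equiv track=rewrite | github.com/HINATIR/nxAssembler | makomo.py | ips_coding
-- ===== SOURCE A (Python) =====
-- def ips_coding(lines, offset):
--     code = ""
--     i = 0
--
--     for line in lines:
--         if i % 10 == 0:
--             if i != 0:
--                 code += "\n"
--             # オフセット計算
--             code += f"{(int(offset, 16) + 4 * i):08X} "
--         # 行を追加
--         code += line.strip()
--         i += 1
--
--     return code
-- ===== SOURCE B (Python) =====
-- def ips_coding(lines, offset):
--     if not lines:
--         return ""
--     base = int(offset, 16)
--     blocks = []
--     for j in range(0, len(lines), 10):
--         blocks.append(f"{base + 4 * j:08X} " + "".join(l.strip() for l in lines[j:j+10]))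
--     return "\n".join(blocks)
-- ===== Notes on version B (the rewrite author's own statement) =====
-- stated objective: simpler
-- what changed: Replaces the per-line counter loop with its i%10 branch and header/newline stitching by chunking the lines into groups of 10, building one formatted block string per chunk, and joining the blocks with newlines; int(offset,16) is evaluated lazily so empty input still returns '' without raising, matching A.
import Mathlib
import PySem

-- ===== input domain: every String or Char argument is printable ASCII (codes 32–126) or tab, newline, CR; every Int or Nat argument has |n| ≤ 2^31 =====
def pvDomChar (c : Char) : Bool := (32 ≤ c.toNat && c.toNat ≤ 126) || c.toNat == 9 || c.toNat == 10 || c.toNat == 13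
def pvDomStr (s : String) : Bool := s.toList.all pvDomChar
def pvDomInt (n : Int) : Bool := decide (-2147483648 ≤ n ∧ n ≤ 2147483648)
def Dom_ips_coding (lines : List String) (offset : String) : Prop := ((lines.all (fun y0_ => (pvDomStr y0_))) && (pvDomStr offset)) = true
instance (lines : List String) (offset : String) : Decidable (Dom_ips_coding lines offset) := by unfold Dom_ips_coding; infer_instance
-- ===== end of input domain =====

-- B chunks the lines into groups of 10 and joins one formatted block per chunk, instead of
-- A's per-line counter loop with an i % 10 branch; same output, same asymptotic cost.

-- Shared formatting helper: Python's f"{v:08X}" (uppercase hex, zero-padded to width 8,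
-- the sign staying in front — exactly str.zfill semantics, hence PySem.Chars.zfill).
def hexDigitChar (n : Nat) : Char := if n < 10 then Char.ofNat (48 + n) else Char.ofNat (55 + n)

def hexChars : Nat → List Char
  | 0 => []
  | n + 1 => hexChars ((n + 1) / 16) ++ [hexDigitChar ((n + 1) % 16)]
decreasing_by exact Nat.div_lt_self (Nat.succ_pos n) (by norm_num)

def hexRepr (n : Nat) : List Char := if n = 0 then ['0'] else hexChars n

def format08X (v : Int) : List Char :=
  PySem.Chars.zfill (if v < 0 then '-' :: hexRepr v.natAbs else hexRepr v.natAbs) 8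

-- ===== PORT A =====
-- one iteration of A's for-loop: state = (code, i)
def stepA (offset : String) (st : List Char × Nat) (line : String) : List Char × Nat :=
  let code := st.1
  let i := st.2
  let code :=
    if i % 10 = 0 then
      (if i ≠ 0 then code ++ ['\n'] else code) ++
        format08X ((PySem.Int.ofStrBase? offset 16).getD 0 + 4 * (i : Int)) ++ [' ']
    else code
  (code ++ PySem.Chars.strip line.toList, i + 1)

def ips_coding (lines : List String) (offset : String) : String :=
  String.mk (lines.foldl (stepA offset) ([], 0)).1

-- ===== PORT B =====
-- "".join(l.strip() for l in chunk)
def stripJoin (chunk : List String) : List Char :=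
  chunk.flatMap (fun l => PySem.Chars.strip l.toList)

-- f"{base + 4*j:08X} " + joined chunk
def blockChars (base : Int) (j : Nat) (chunk : List String) : List Char :=
  format08X (base + 4 * (j : Int)) ++ [' '] ++ stripJoin chunk

-- the grouping loop: one block per group of 10 lines, j stepping by 10
def blocksFrom (base : Int) (j : Nat) : List String → List (List Char)
  | [] => []
  | x :: rest => blockChars base j (x :: rest.take 9) :: blocksFrom base (j + 10) (rest.drop 9)
termination_by xs => xs.length
decreasing_by simp [List.length_drop]

def ips_coding_alt (lines : List String) (offset : String) : String :=
  match lines with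
  | [] => ""
  | _ :: _ =>
    String.mk (PySem.Chars.join ['\n']
      (blocksFrom ((PySem.Int.ofStrBase? offset 16).getD 0) 0 lines))

-- ===== PRECONDITION & SPEC =====
-- Pre_ excludes exactly the inputs where Python A raises: a nonempty `lines` with an offset
-- on which int(offset, 16) raises ValueError (B raises there too).
def Pre_ips_coding (lines : List String) (offset : String) : Prop :=
  lines = [] ∨ (PySem.Int.ofStrBase? offset 16).isSome = true
instance (lines : List String) (offset : String) : Decidable (Pre_ips_coding lines offset) := by
  unfold Pre_ips_coding; infer_instance

def pvWitness_ips_coding : List String × String := ([" add r1 ", "mov r2"], "1F")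

def Spec_ips_coding (lines : List String) (offset : String) (out : String) : Prop := out = ips_coding_alt lines offset
instance (lines : List String) (offset : String) (out : String) : Decidable (Spec_ips_coding lines offset out) := by unfold Spec_ips_coding; infer_instance

-- ===== CLAIM (what is proved, stated in full; the proofs are below) =====
def Claim_equal_ips_coding : Prop := ∀ (lines : List String) (offset : String), Dom_ips_coding lines offset → Pre_ips_coding lines offset → Spec_ips_coding lines offset (ips_coding lines offset)

-- ===== LEMMAS AND PROOFS =====

-- what A's loop still has to emit when it stands at chunk boundary 10*k with xs lines left
def tailRender (base : Int) (k : Nat) (xs : List String) : List Char :=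
  match xs with
  | [] => []
  | _ :: _ => (if k = 0 then [] else ['\n']) ++ PySem.Chars.join ['\n'] (blocksFrom base (10 * k) xs)

theorem tailRender_cons (base : Int) (k : Nat) (x : String) (rest : List String) :
    tailRender base k (x :: rest) =
      (if k = 0 then [] else ['\n']) ++ PySem.Chars.join ['\n'] (blocksFrom base (10 * k) (x :: rest)) := rfl

theorem blocksFrom_cons (base : Int) (j : Nat) (x : String) (rest : List String) :
    blocksFrom base j (x :: rest) =
      blockChars base j (x :: rest.take 9) :: blocksFrom base (j + 10) (rest.drop 9) := by
  rw [blocksFrom]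

-- Mid-chunk: while i % 10 ≠ 0 and the whole list fits inside the current chunk,
-- A's loop just appends the stripped lines and advances the counter.
theorem foldA_inner (offset : String) :
    ∀ (ys : List String) (code : List Char) (i : Nat),
      i % 10 ≠ 0 → i % 10 + ys.length ≤ 10 →
      List.foldl (stepA offset) (code, i) ys = (code ++ stripJoin ys, i + ys.length) := by
  intro ys
  induction ys with
  | nil => intro code i _ _; simp [stripJoin]
  | cons y ys ih =>
    intro code i h0 hlen
    have hstep : stepA offset (code, i) y = (code ++ PySem.Chars.strip y.toList, i + 1) := by
      simp [stepA, h0]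
    rw [List.foldl_cons, hstep]
    cases ys with
    | nil => simp [stripJoin]
    | cons z zs =>
      have hl : i % 10 + (zs.length + 1 + 1) ≤ 10 := by
        simpa [List.length_cons] using hlen
      have h1 : (i + 1) % 10 ≠ 0 := by omega
      have h2 : (i + 1) % 10 + (z :: zs).length ≤ 10 := by
        simp only [List.length_cons]; omega
      rw [ih (code ++ PySem.Chars.strip y.toList) (i + 1) h1 h2]
      simp only [stripJoin, List.flatMap_cons, List.append_assoc, List.length_cons,
        Prod.mk.injEq, true_and]
      omega

-- Chunk level: starting at a chunk boundary i = 10*k, A's loop emits exactly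
-- the '\n'-joined blocks B builds (with a leading '\n' iff k ≠ 0 and lines remain).
theorem foldA_main (offset : String) :
    ∀ (n : Nat) (xs : List String) (code : List Char) (k : Nat), xs.length ≤ n →
      (List.foldl (stepA offset) (code, 10 * k) xs).1 =
        code ++ tailRender ((PySem.Int.ofStrBase? offset 16).getD 0) k xs := by
  intro n
  induction n with
  | zero =>
    intro xs code k hn
    have : xs = [] := List.length_eq_zero_iff.mp (Nat.le_zero.mp hn)
    subst this; simp [tailRender]
  | succ n ih =>
    intro xs code k hn
    cases xs with
    | nil => simp [tailRender]
    | cons x rest =>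
      have hstep : stepA offset (code, 10 * k) x =
          ((if 10 * k ≠ 0 then code ++ ['\n'] else code) ++
            format08X ((PySem.Int.ofStrBase? offset 16).getD 0 + 4 * ((10 * k : Nat) : Int)) ++ [' ']
            ++ PySem.Chars.strip x.toList, 10 * k + 1) := by
        simp [stepA]
      rw [List.foldl_cons, hstep]
      have htake : (List.take 9 rest).length ≤ 9 := by
        simp
      conv_lhs => rw [← List.take_append_drop 9 rest, List.foldl_append]
      rw [foldA_inner offset (List.take 9 rest) _ (10 * k + 1) (by omega) (by omega)]
      rw [tailRender_cons, blocksFrom_cons]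
      by_cases hre : rest.length ≤ 9
      · -- last chunk
        have hdrop : List.drop 9 rest = [] := List.drop_eq_nil_of_le hre
        have htk : List.take 9 rest = rest := List.take_of_length_le hre
        rw [hdrop, htk]
        simp only [List.foldl_nil, blocksFrom, PySem.Chars.join_singleton, blockChars,
          stripJoin, List.flatMap_cons]
        by_cases hk : k = 0 <;> simp [hk, List.append_assoc]
      · -- there is at least one more chunk
        have hlt : List.drop 9 rest ≠ [] := by
          intro h
          have := List.drop_eq_nil_iff.mp h
          omega
        have htk9 : (List.take 9 rest).length = 9 := by
          rw [List.length_take]; omega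
        have hi : 10 * k + 1 + (List.take 9 rest).length = 10 * (k + 1) := by
          rw [htk9]; ring
        rw [hi]
        have hdlen : (List.drop 9 rest).length ≤ n := by
          rw [List.length_drop]
          have : rest.length + 1 ≤ n + 1 := by simpa [List.length_cons] using hn
          omega
        rw [ih (List.drop 9 rest) _ (k + 1) hdlen]
        cases hd : List.drop 9 rest with
        | nil => exact absurd hd hlt
        | cons d ds =>
          have h10 : 10 * k + 10 = 10 * (k + 1) := by ring
          rw [h10, tailRender_cons, blocksFrom_cons, PySem.Chars.join_cons_cons]
          simp only [blockChars, stripJoin, List.append_assoc, List.flatMap_cons]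
          by_cases hk : k = 0 <;> simp [hk, List.append_assoc]

-- ===== VERDICT (by name: the statement is the Claim_ definition above) =====
theorem ips_coding_spec : Claim_equal_ips_coding := by
  intro lines offset _ _
  unfold Spec_ips_coding ips_coding ips_coding_alt
  cases lines with
  | nil => rfl
  | cons x rest =>
    have h := foldA_main offset (x :: rest).length (x :: rest) [] 0 (le_refl _)
    simp only [Nat.mul_zero] at h
    rw [h]
    simp [tailRender]
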